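-- pv_equiv track=rewrite | github.com/charan2108/pyprocharmprojects | pythoncrashcourse/variables/variables.py | solution
-- ===== SOURCE A (Python) =====
-- def solution(N, X,Y,Z):
--     N = bin(N)[2:]
--     b = 0
--     maxb = 0
--     for a in N:
--        if int(a)==0:
--            b+=1
--        elif int(a)==1:
--             maxb=max(b,maxb)
--             b=0
--     return maxb
-- ===== SOURCE B (Python) =====
-- def solution(N, X, Y, Z):
--     s = bin(N)[2:]
--     ones = [i for i, c in enumerate(s) if int(c)]
--     best = 0
--     for i, j in zip(ones, ones[1:]):
--         best = max(best, j - i - 1)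
--     return best
-- ===== Notes on version B (the rewrite author's own statement) =====
-- stated objective: alternative
-- what changed: Replaces A's running state machine (zero-run counter + running max reset at each '1') by collecting the positions of the '1' bits once and taking the max of consecutive position differences minus one.
import Mathlib
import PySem

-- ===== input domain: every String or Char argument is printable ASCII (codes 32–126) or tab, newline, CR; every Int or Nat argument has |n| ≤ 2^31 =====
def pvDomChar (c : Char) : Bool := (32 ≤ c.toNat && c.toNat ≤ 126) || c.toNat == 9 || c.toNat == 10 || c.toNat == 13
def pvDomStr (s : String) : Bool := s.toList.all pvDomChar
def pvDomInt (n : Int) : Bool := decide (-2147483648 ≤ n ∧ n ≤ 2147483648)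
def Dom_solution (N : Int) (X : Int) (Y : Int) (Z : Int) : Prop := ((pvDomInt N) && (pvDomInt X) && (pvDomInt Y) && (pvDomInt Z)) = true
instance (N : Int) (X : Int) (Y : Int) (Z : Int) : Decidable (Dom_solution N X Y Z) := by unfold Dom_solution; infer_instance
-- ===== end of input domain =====

-- B replaces A's state machine by '1'-positions + max of consecutive differences; same cost, different decomposition.

-- ===== PORT A =====
-- bin(n)[2:] for n ≥ 0 (Python raises ValueError for n < 0, excluded by Pre_): binary digits, no leading zeros.
def pvBinNatAux : Nat → List Char
  | 0 => []
  | n + 1 => pvBinNatAux ((n + 1) / 2) ++ [if (n + 1) % 2 = 1 then '1' else '0']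
decreasing_by exact Nat.div_lt_self (Nat.succ_pos n) (by norm_num)

def pvBinChars (N : Int) : List Char := if N = 0 then ['0'] else pvBinNatAux N.toNat

-- loop body of A: int(a)==0 / int(a)==1; on Pre_ every char is '0' or '1', so the char comparison is exact
def pvStep (p : Int × Int) (a : Char) : Int × Int :=
  if a = '0' then (p.1 + 1, p.2)
  else if a = '1' then (0, max p.1 p.2)
  else p

def solution (N : Int) (X : Int) (Y : Int) (Z : Int) : Int :=
  let s := pvBinChars N
  (s.foldl pvStep (0, 0)).2

-- ===== PORT B =====
def solution_alt (N : Int) (X : Int) (Y : Int) (Z : Int) : Int :=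
  let s := pvBinChars N
  -- int(c) is truthy exactly for '1' on the binary digits admitted by Pre_
  let ones : List Int := ((PySem.List.enumerate s 0).filter (fun p => p.2 == '1')).map (·.1)
  (ones.zip (ones.drop 1)).foldl (fun best pr => max best (pr.2 - pr.1 - 1)) 0

-- ===== PRECONDITION & SPEC =====
-- Pre_ excludes only N < 0, on which Python's int('b') raises ValueError in both A and B.
def Pre_solution (N : Int) (X : Int) (Y : Int) (Z : Int) : Prop := 0 ≤ N
instance (N : Int) (X : Int) (Y : Int) (Z : Int) : Decidable (Pre_solution N X Y Z) := by unfold Pre_solution; infer_instance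
def pvWitness_solution : Int × Int × Int × Int := (9, 0, 0, 0)

def Spec_solution (N : Int) (X : Int) (Y : Int) (Z : Int) (out : Int) : Prop := out = solution_alt N X Y Z
instance (N : Int) (X : Int) (Y : Int) (Z : Int) (out : Int) : Decidable (Spec_solution N X Y Z out) := by unfold Spec_solution; infer_instance

-- ===== CLAIM (what is proved, stated in full; the proofs are below) =====
def Claim_equal_solution : Prop := ∀ (N : Int) (X : Int) (Y : Int) (Z : Int), Dom_solution N X Y Z → Pre_solution N X Y Z → Spec_solution N X Y Z (solution N X Y Z)

-- ===== LEMMAS AND PROOFS =====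

-- max of b-prefixed zero runs terminated by a '1' (A's fold, with the running max stripped off)
def pvGm : Int → List Char → Int
  | _, [] => 0
  | b, c :: t => if c = '0' then pvGm (b + 1) t else max b (pvGm 0 t)

-- max gap before each one-position, previous one at p
def pvG : Int → List Int → Int
  | _, [] => 0
  | p, q :: qs => max (q - p - 1) (pvG q qs)

theorem pvBinNatAux_mem : ∀ n : Nat, ∀ c ∈ pvBinNatAux n, c = '0' ∨ c = '1' := by
  intro n
  induction n using Nat.strong_induction_on with
  | _ n ih =>
    match n with
    | 0 => intro c hc; simp [pvBinNatAux] at hc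
    | m + 1 =>
      intro c hc
      rw [pvBinNatAux] at hc
      rcases List.mem_append.1 hc with h | h
      · exact ih ((m + 1) / 2) (Nat.div_lt_self (Nat.succ_pos m) (by norm_num)) c h
      · simp at h; split at h <;> simp [h]

theorem pvBinNatAux_head : ∀ n : Nat, 0 < n → ∃ t, pvBinNatAux n = '1' :: t := by
  intro n
  induction n using Nat.strong_induction_on with
  | _ n ih =>
    match n with
    | 0 => intro h; omega
    | m + 1 =>
      intro _
      rw [pvBinNatAux]
      by_cases h2 : (m + 1) / 2 = 0
      · have hm : m = 0 := by omega
        subst hm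
        exact ⟨[], by simp [h2, pvBinNatAux]⟩
      · obtain ⟨t, ht⟩ := ih ((m + 1) / 2) (Nat.div_lt_self (Nat.succ_pos m) (by norm_num)) (Nat.pos_of_ne_zero h2)
        exact ⟨t ++ [if (m + 1) % 2 = 1 then '1' else '0'], by rw [ht]; simp⟩

theorem pvL1 : ∀ (s : List Char) (b m : Int), 0 ≤ m → (∀ c ∈ s, c = '0' ∨ c = '1') →
    (s.foldl pvStep (b, m)).2 = max m (pvGm b s) := by
  intro s
  induction s with
  | nil => intro b m hm _; simp [pvGm]; omega
  | cons c t ih =>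
    intro b m hm hmem
    rcases hmem c (by simp) with h | h <;> subst h
    · simpa [pvStep, pvGm] using ih (b + 1) m hm (fun c hc => hmem c (by simp [hc]))
    · have hstep : pvStep (b, m) '1' = (0, max b m) := by simp [pvStep]
      rw [List.foldl_cons, hstep, ih 0 (max b m) (by omega) (fun c hc => hmem c (by simp [hc]))]
      simp only [pvGm]
      rw [if_neg (by decide : ¬('1' : Char) = '0')]
      omega

theorem pvL2 : ∀ (s : List Char) (n b : Int), (∀ c ∈ s, c = '0' ∨ c = '1') →
    pvGm b s = pvG (n - 1 - b) (((PySem.List.enumerate s n).filter (fun p => p.2 == '1')).map (·.1)) := by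
  intro s
  induction s with
  | nil => intro n b _; simp [pvGm, PySem.List.enumerate_nil, pvG]
  | cons c t ih =>
    intro n b hmem
    rw [PySem.List.enumerate_cons]
    rcases hmem c (by simp) with h | h <;> subst h
    · simp only [pvGm, List.filter_cons]
      have := ih (n + 1) (b + 1) (fun c hc => hmem c (by simp [hc]))
      simp only [show n + 1 - 1 - (b + 1) = n - 1 - b by ring] at this
      simpa using this
    · have hrest := ih (n + 1) 0 (fun c hc => hmem c (by simp [hc]))
      simp only [show n + 1 - 1 - 0 = n by ring] at hrest
      simp only [pvGm, List.filter_cons]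
      rw [if_neg (by decide : ¬('1' : Char) = '0')]
      simp only [show (((n : Int), '1').2 == '1') = true from by simp, if_true, List.map_cons, pvG, hrest]
      omega

theorem pvL3 : ∀ (qs : List Int) (p m : Int), 0 ≤ m →
    ((List.zip (p :: qs) qs).foldl (fun best pr => max best (pr.2 - pr.1 - 1)) m) = max m (pvG p qs) := by
  intro qs
  induction qs with
  | nil => intro p m hm; simp [pvG]; omega
  | cons q t ih =>
    intro p m hm
    simp only [List.zip_cons_cons, List.foldl_cons]
    rw [ih q (max m (q - p - 1)) (by omega)]
    simp [pvG, max_assoc]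

-- ===== VERDICT (by name: the statement is the Claim_ definition above) =====
theorem solution_spec : Claim_equal_solution := by
  intro N X Y Z _ hPre
  show solution N X Y Z = solution_alt N X Y Z
  by_cases h0 : N = 0
  · subst h0; rfl
  · have hge : (0 : Int) ≤ N := hPre
    have hN : 0 < N.toNat := by omega
    obtain ⟨t, ht⟩ := pvBinNatAux_head N.toNat hN
    have hmem : ∀ c ∈ '1' :: t, c = '0' ∨ c = '1' := ht ▸ pvBinNatAux_mem N.toNat
    unfold solution solution_alt
    simp only [pvBinChars, if_neg h0, ht]
    rw [pvL1 _ 0 0 le_rfl hmem, pvL2 _ 0 0 hmem]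
    rw [PySem.List.enumerate_cons]
    simp only [List.filter_cons, show (((0 : Int), '1').2 == '1') = true from by decide, if_true,
      List.map_cons, List.drop_one, List.tail_cons]
    rw [pvL3 _ _ 0 le_rfl]
    simp only [pvG]
    omega
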